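-- pv_equiv track=rewrite | github.com/daniel-reich/turbo-robot | 28mJ6NgqbQS4YRgDc_17.py | can_pay_cost
-- ===== SOURCE A (Python) =====
-- def can_pay_cost(mana_pool, cost):
--
--
--   d = {'B':0,'W':0,'R':0,'G':0,'U':0,'C':0}
--   e = {'B':0,'W':0,'R':0,'G':0,'U':0,'C':0}
--   total = 0
--   for i in range(0,len(mana_pool)):
--     d[mana_pool[i]]+=1
--
--   variable = 0
--   i = 0
--   while i<len(cost):
--     if ord(cost[i])>57:
--       e[cost[i]]+=1
--       i+=1
--     else:
--       tmp = ""
--       j = i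
--       val=-1
--       while j<len(cost):
--         if ord(cost[j])>57:
--           val = j
--           break
--         else:
--           tmp+=cost[j]
--           j+=1
--       variable+=int(tmp)
--       if val>0:
--         i = val
--       else:
--         break
--
--
--   for x in e:
--     if d[x]<e[x]:return False
--     d[x]-=e[x]
--     total+=d[x]
--   return total>=variable
-- ===== SOURCE B (Python) =====
-- def can_pay_cost(mana_pool, cost):
--     # Pay-by-removal simulation: recursively remove each colored symbol of the
--     # cost from a working copy of the pool (fail if a card is missing), then
--     # check the leftover cards cover the generic part.
--     def pay(pool, syms):
--         if not syms:
--             return pool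
--         s = syms[0]
--         if s not in pool:
--             return None
--         p = list(pool)
--         p.remove(s)
--         return pay(p, syms[1:])
--
--     symbols = []
--     runs = []
--     cur = ''
--     for ch in cost:
--         if ch > '9':
--             if cur:
--                 runs.append(cur)
--                 cur = ''
--             symbols.append(ch)
--         else:
--             cur += ch
--     if cur:
--         runs.append(cur)
--     generic = sum(int(r) for r in runs)
--
--     remaining = pay(list(mana_pool), symbols)
--     return remaining is not None and len(remaining) >= generic
-- ===== Notes on version B (the rewrite author's own statement) =====
-- stated objective: alternative
-- what changed: Instead of counting occurrences of each of six colours in two counter dicts and comparing counts, B simulates actually paying: it recursively removes each colored symbol of the cost from a working copy of the pool (failing when a card is missing) and then checks that the leftover cards cover the generic total parsed from the digit runs.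
-- outside the precondition, e.g. on can_pay_cost('', '+5'): A returns False, B returns False; on can_pay_cost('B', ' 7 '): A returns False, B returns False
import Mathlib
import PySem

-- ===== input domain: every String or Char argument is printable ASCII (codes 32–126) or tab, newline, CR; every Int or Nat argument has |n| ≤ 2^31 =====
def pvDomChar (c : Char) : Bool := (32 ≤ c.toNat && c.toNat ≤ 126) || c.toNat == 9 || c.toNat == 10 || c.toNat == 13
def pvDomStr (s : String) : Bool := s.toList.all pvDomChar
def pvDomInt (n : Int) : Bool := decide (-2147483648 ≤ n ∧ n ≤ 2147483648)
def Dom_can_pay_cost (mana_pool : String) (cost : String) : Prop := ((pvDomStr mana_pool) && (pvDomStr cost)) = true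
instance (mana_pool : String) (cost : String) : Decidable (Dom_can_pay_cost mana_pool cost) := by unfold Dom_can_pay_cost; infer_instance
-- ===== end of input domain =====

-- B replaces A's count-and-compare (two counter dicts, nested index-jumping while loops) by a
-- pay-by-removal simulation: each colored symbol is removed from a working copy of the pool,
-- and the leftover cards must cover the generic total; alternative decomposition, same result.

-- ===== PORT A =====
-- the six mana colours, in the insertion order of A's dict literals
def pvColors : List Char := ['B', 'W', 'R', 'G', 'U', 'C']

def pvInitDict : PySem.Dict Char Int :=
  PySem.Dict.ofList [('B',0),('W',0),('R',0),('G',0),('U',0),('C',0)]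

-- 'ord(c) > 57' test of A (= B's "ch > '9'")
def pvPd (c : Char) : Bool := decide (57 < c.toNat)

-- A's inner while: scan from j, collecting tmp until a char with ord > 57; val = its index or -1
def pvInnerScan (cs : List Char) (j : Nat) : List Char × Int :=
  if h : j < cs.length then
    if pvPd (cs.getD j ' ') then ([], (j : Int))
    else
      let r := pvInnerScan cs (j + 1)
      (cs.getD j ' ' :: r.1, r.2)
  else ([], -1)
termination_by cs.length - j

-- characterisation of pvInnerScan, needed by pvOuter's termination proof
theorem pvInnerScan_spec (cs : List Char) (j : Nat) :
    pvInnerScan cs j = ((cs.drop j).takeWhile (fun c => !pvPd c),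
      if j + ((cs.drop j).takeWhile (fun c => !pvPd c)).length < cs.length
      then ((j + ((cs.drop j).takeWhile (fun c => !pvPd c)).length : Nat) : Int) else -1) := by
  fun_induction pvInnerScan cs j with
  | case1 j h hpd =>
    have hdrop : cs.drop j = cs[j] :: cs.drop (j + 1) := List.drop_eq_getElem_cons h
    have hg : cs.getD j ' ' = cs[j] := List.getD_eq_getElem cs ' ' h
    rw [hg] at hpd
    rw [hdrop, List.takeWhile_cons]
    rw [if_neg (by simp [hpd])]
    simp only [List.length_nil, Nat.add_zero, if_pos h]
  | case2 j h hpd r ih =>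
    have hdrop : cs.drop j = cs[j] :: cs.drop (j + 1) := List.drop_eq_getElem_cons h
    have hg : cs.getD j ' ' = cs[j] := List.getD_eq_getElem cs ' ' h
    rw [hg] at hpd
    simp only [Bool.not_eq_true] at hpd
    rw [hdrop, List.takeWhile_cons]
    have hcnd : (!pvPd cs[j]) = true := by simp [hpd]
    rw [if_pos hcnd]
    have hr : r = pvInnerScan cs (j + 1) := rfl
    rw [hg, hr, ih]
    rw [Prod.mk.injEq]
    refine ⟨rfl, ?_⟩
    simp only [List.length_cons]
    split_ifs <;> [push_cast; omega; omega; rfl] <;> omega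
  | case3 j h =>
    have hdrop : cs.drop j = [] := List.drop_eq_nil_of_le (by omega)
    rw [hdrop]
    simp
    omega

-- A's outer while over cost: builds e and variable
def pvOuter (cs : List Char) (i : Nat) (e : PySem.Dict Char Int) (v : Int) :
    PySem.Dict Char Int × Int :=
  if h : i < cs.length then
    if hc : pvPd (cs.getD i ' ') then
      pvOuter cs (i + 1) (e.modify (cs.getD i ' ') 0 (· + 1)) v
    else
      let r := pvInnerScan cs i
      let v' := v + (PySem.Int.ofChars? r.1).getD 0   -- int(tmp); ValueError is excluded by Pre_
      if hv : 0 < r.2 then pvOuter cs r.2.toNat e v' else (e, v')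
  else (e, v)
termination_by cs.length - i
decreasing_by
  · omega
  · have hs := pvInnerScan_spec cs i
    have hget : cs.getD i ' ' = cs[i] := List.getD_eq_getElem cs ' ' h
    have hpd : pvPd cs[i] = false := by rw [← hget]; simpa using hc
    have hne : (cs.drop i).takeWhile (fun c => !pvPd c) ≠ [] := by
      have hdrop : cs.drop i = cs[i] :: cs.drop (i + 1) := List.drop_eq_getElem_cons h
      rw [hdrop]; simp [hpd]; exact h
    have hv' : 0 < (pvInnerScan cs i).2 := hv
    rw [hs] at hv'
    simp only at hv'
    have hL : 0 < ((cs.drop i).takeWhile (fun c => !pvPd c)).length := List.length_pos_iff.mpr hne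
    split at hv'
    · next hlt =>
      have ht : (pvInnerScan cs i).2.toNat = i + ((cs.drop i).takeWhile (fun c => !pvPd c)).length := by
        rw [hs]; simp only; rw [if_pos hlt]; omega
      omega
    · omega

-- A's final 'for x in e' loop; e's keys are exactly the six initial keys wherever the
-- Python reaches this loop (any other char raised KeyError earlier, excluded by Pre_)
def pvFinLoop (d e : PySem.Dict Char Int) (total : Int) : List Char → Option Int
  | [] => some total
  | x :: rest =>
    if d.getD x 0 < e.getD x 0 then none
    else
      let d' := d.insert x (d.getD x 0 - e.getD x 0)
      pvFinLoop d' e (total + d'.getD x 0) rest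

def can_pay_cost (mana_pool : String) (cost : String) : Bool :=
  -- for i in range(0, len(mana_pool)): d[mana_pool[i]] += 1   (KeyError excluded by Pre_)
  let d := (PySem.List.pyRange 0 (PySem.Str.len mana_pool) 1).foldl
      (fun d i => d.modify (PySem.List.pyGetD mana_pool.toList i ' ') 0 (· + 1)) pvInitDict
  let r := pvOuter cost.toList 0 pvInitDict 0
  match pvFinLoop d r.1 0 pvColors with
  | none => false
  | some total => decide (r.2 ≤ total)

-- ===== PORT B =====
-- B's recursive pay(pool, syms): remove each symbol from the working pool, None if missing
def pvPay (pool : List Char) (syms : List Char) : Option (List Char) :=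
  match syms with
  | [] => some pool
  | s :: rest =>
    match PySem.List.remove? pool s with   -- 'if s not in pool: return None' + 'p.remove(s)'
    | none => none
    | some p => pvPay p rest

-- B's parse loop body: state = (symbols, runs, cur)
def pvParseStep (st : List Char × List (List Char) × List Char) (ch : Char) :
    List Char × List (List Char) × List Char :=
  if pvPd ch then   -- ch > '9'
    if st.2.2 ≠ [] then (st.1 ++ [ch], st.2.1 ++ [st.2.2], [])
    else (st.1 ++ [ch], st.2.1, [])
  else (st.1, st.2.1, st.2.2 ++ [ch])

def can_pay_cost_alt (mana_pool : String) (cost : String) : Bool :=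
  let p := cost.toList.foldl pvParseStep ([], [], [])
  let runs := if p.2.2 ≠ [] then p.2.1 ++ [p.2.2] else p.2.1
  let generic := (runs.map (fun r => (PySem.Int.ofChars? r).getD 0)).sum  -- sum(int(r) for r in runs)
  match pvPay mana_pool.toList p.1 with
  | none => false
  | some r => decide (generic ≤ (r.length : Int))

-- ===== PRECONDITION & SPEC =====
-- Pre_ excludes inputs where A raises (KeyError on a character outside the six colours,
-- ValueError from int() on a junk digit run) and, to stay closed-form, the few cost strings
-- with sign/whitespace characters inside a number run that int() happens to accept.
def Pre_can_pay_cost (mana_pool : String) (cost : String) : Prop :=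
  mana_pool.toList.all pvColors.contains = true ∧
  cost.toList.all (fun c => pvColors.contains c || c.isDigit) = true
instance (mana_pool : String) (cost : String) : Decidable (Pre_can_pay_cost mana_pool cost) := by
  unfold Pre_can_pay_cost; infer_instance

def pvWitness_can_pay_cost : String × String := ("BBGR", "2B")

def Spec_can_pay_cost (mana_pool : String) (cost : String) (out : Bool) : Prop := out = can_pay_cost_alt mana_pool cost
instance (mana_pool : String) (cost : String) (out : Bool) : Decidable (Spec_can_pay_cost mana_pool cost out) := by unfold Spec_can_pay_cost; infer_instance

-- ===== CLAIM (what is proved, stated in full; the proofs are below) =====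
def Claim_equal_can_pay_cost : Prop := ∀ (mana_pool : String) (cost : String), Dom_can_pay_cost mana_pool cost → Pre_can_pay_cost mana_pool cost → Spec_can_pay_cost mana_pool cost (can_pay_cost mana_pool cost)

-- ===== LEMMAS AND PROOFS =====

-- the sum of the values of the maximal non-colour runs of a list (int() read with default 0)
def pvRunSum : List Char → Int
  | [] => 0
  | c :: t =>
    if pvPd c then pvRunSum t
    else (PySem.Int.ofChars? (c :: t.takeWhile (fun x => !pvPd x))).getD 0 +
      pvRunSum (t.dropWhile (fun x => !pvPd x))
termination_by l => l.length
decreasing_by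
  · simp
  · have := List.length_dropWhile_le (fun x => !pvPd x) t
    simp only [List.length_cons]
    omega

-- e after the whole cost loop, as a fold over the colour chars of the suffix
def pvAddCounts (e : PySem.Dict Char Int) (l : List Char) : PySem.Dict Char Int :=
  (l.filter pvPd).foldl (fun e c => e.modify c 0 (· + 1)) e

theorem pv_dropWhile_eq (p : Char → Bool) (l : List Char) :
    l.dropWhile p = l.drop (l.takeWhile p).length := by
  induction l with
  | nil => rfl
  | cons x t ih =>
    by_cases hp : p x
    · simp [List.takeWhile_cons, hp, ih]
    · simp [hp]

theorem pvRunSum_pd (c : Char) (t : List Char) (h : pvPd c = true) :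
    pvRunSum (c :: t) = pvRunSum t := by
  rw [pvRunSum]; simp [h]

theorem pvRunSum_nd (c : Char) (t : List Char) (h : pvPd c = false) :
    pvRunSum (c :: t) =
      (PySem.Int.ofChars? (c :: t.takeWhile (fun x => !pvPd x))).getD 0 +
      pvRunSum (t.dropWhile (fun x => !pvPd x)) := by
  rw [pvRunSum]; simp [h]

-- under pvPd-false head: the digit run at the head of l, and the facts A's digit branch needs
theorem pv_run_facts (cs : List Char) (i : Nat) (h : i < cs.length) (hpd : pvPd cs[i] = false) :
    pvRunSum (cs.drop i) =
      (PySem.Int.ofChars? ((cs.drop i).takeWhile (fun x => !pvPd x))).getD 0 +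
      pvRunSum (cs.drop (i + ((cs.drop i).takeWhile (fun x => !pvPd x)).length)) ∧
    cs.drop (i + ((cs.drop i).takeWhile (fun x => !pvPd x)).length) =
      (cs.drop i).dropWhile (fun x => !pvPd x) ∧
    (cs.drop i).filter pvPd =
      ((cs.drop i).dropWhile (fun x => !pvPd x)).filter pvPd := by
  have hdrop : cs.drop i = cs[i] :: cs.drop (i + 1) := List.drop_eq_getElem_cons h
  have hdd : cs.drop (i + ((cs.drop i).takeWhile (fun x => !pvPd x)).length) =
      (cs.drop i).dropWhile (fun x => !pvPd x) := by
    rw [pv_dropWhile_eq, List.drop_drop, Nat.add_comm]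
  refine ⟨?_, hdd, ?_⟩
  · rw [hdd]
    conv_lhs => rw [hdrop]
    rw [pvRunSum_nd _ _ hpd]
    conv_rhs => rw [hdrop]
    rw [List.takeWhile_cons, List.dropWhile_cons]
    simp [hpd]
  · conv_lhs => rw [← List.takeWhile_append_dropWhile (p := fun x => !pvPd x) (l := cs.drop i)]
    rw [List.filter_append]
    have : ((cs.drop i).takeWhile (fun x => !pvPd x)).filter pvPd = [] := by
      rw [List.filter_eq_nil_iff]
      intro a ha
      have := List.mem_takeWhile_imp ha
      simpa using this
    rw [this, List.nil_append]

theorem pvOuter_spec (cs : List Char) (i : Nat) (e : PySem.Dict Char Int) (v : Int) :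
    pvOuter cs i e v = (pvAddCounts e (cs.drop i), v + pvRunSum (cs.drop i)) := by
  fun_induction pvOuter cs i e v with
  | case1 i e v h hc ih =>
    have hg : cs.getD i ' ' = cs[i] := List.getD_eq_getElem cs ' ' h
    have hdrop : cs.drop i = cs[i] :: cs.drop (i + 1) := List.drop_eq_getElem_cons h
    have hpd : pvPd cs[i] = true := by rw [← hg]; exact hc
    rw [ih]
    rw [Prod.mk.injEq]
    constructor
    · rw [pvAddCounts, pvAddCounts]
      conv_rhs => rw [hdrop, List.filter_cons]
      simp only [hpd, if_pos, List.foldl_cons, hg]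
    · conv_rhs => rw [hdrop, pvRunSum_pd _ _ hpd]
  | case2 i e v h hc r v' hv ih =>
    have hg : cs.getD i ' ' = cs[i] := List.getD_eq_getElem cs ' ' h
    have hpd : pvPd cs[i] = false := by rw [← hg]; simpa using hc
    have hs := pvInnerScan_spec cs i
    obtain ⟨hrs, hdd, hfil⟩ := pv_run_facts cs i h hpd
    have hr1 : r.1 = (cs.drop i).takeWhile (fun x => !pvPd x) := by rw [show r = pvInnerScan cs i from rfl, hs]
    have hne : (cs.drop i).takeWhile (fun x => !pvPd x) ≠ [] := by
      have hdrop : cs.drop i = cs[i] :: cs.drop (i + 1) := List.drop_eq_getElem_cons h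
      rw [hdrop]; simp [hpd]; exact h
    have hv2 : 0 < (pvInnerScan cs i).2 := hv
    rw [hs] at hv2
    simp only at hv2
    have hL : 0 < ((cs.drop i).takeWhile (fun x => !pvPd x)).length := List.length_pos_iff.mpr hne
    have ht : r.2.toNat = i + ((cs.drop i).takeWhile (fun x => !pvPd x)).length := by
      rw [show r = pvInnerScan cs i from rfl, hs]
      simp only
      split at hv2
      · next hlt => rw [if_pos hlt]; omega
      · omega
    rw [ih, ht]
    rw [Prod.mk.injEq]
    constructor
    · rw [pvAddCounts, pvAddCounts, hdd, hfil]
    · rw [hrs]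
      show v + (PySem.Int.ofChars? r.1).getD 0 + _ = _
      rw [hr1]
      ring
  | case3 i e v h hc r v' hv =>
    have hg : cs.getD i ' ' = cs[i] := List.getD_eq_getElem cs ' ' h
    have hpd : pvPd cs[i] = false := by rw [← hg]; simpa using hc
    have hs := pvInnerScan_spec cs i
    obtain ⟨hrs, hdd, hfil⟩ := pv_run_facts cs i h hpd
    have hr1 : r.1 = (cs.drop i).takeWhile (fun x => !pvPd x) := by rw [show r = pvInnerScan cs i from rfl, hs]
    have hne : (cs.drop i).takeWhile (fun x => !pvPd x) ≠ [] := by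
      have hdrop : cs.drop i = cs[i] :: cs.drop (i + 1) := List.drop_eq_getElem_cons h
      rw [hdrop]; simp [hpd]; exact h
    have hL : 0 < ((cs.drop i).takeWhile (fun x => !pvPd x)).length := List.length_pos_iff.mpr hne
    have hv2 : ¬ 0 < (pvInnerScan cs i).2 := hv
    rw [hs] at hv2
    simp only at hv2
    have hbig : ¬ (i + ((cs.drop i).takeWhile (fun x => !pvPd x)).length < cs.length) := by
      by_contra hcon
      rw [if_pos hcon] at hv2
      omega
    have hnil : cs.drop (i + ((cs.drop i).takeWhile (fun x => !pvPd x)).length) = [] :=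
      List.drop_eq_nil_of_le (by omega)
    rw [Prod.mk.injEq]
    constructor
    · rw [pvAddCounts, hfil, ← hdd, hnil]
      rfl
    · show v + (PySem.Int.ofChars? r.1).getD 0 = _
      rw [hrs, hnil, hr1]
      show _ = v + (_ + pvRunSum [])
      rw [pvRunSum]
      ring
  | case4 i e v h =>
    have hnil : cs.drop i = [] := List.drop_eq_nil_of_le (by omega)
    rw [hnil]
    rw [Prod.mk.injEq]
    exact ⟨rfl, by rw [pvRunSum]; ring⟩

theorem pv_digit_pd (c : Char) (h : c.isDigit = true) : pvPd c = false := by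
  simp [Char.isDigit, decide_eq_true_eq] at h
  have h2 : c.val.toNat ≤ 57 := by
    have h57 := h.2
    rw [UInt32.le_iff_toNat_le] at h57
    simpa using h57
  simp only [pvPd, decide_eq_false_iff_not, not_lt, Char.toNat]
  exact h2

theorem pv_tw_append (p : Char → Bool) (l1 l2 : List Char) (h : ∀ c ∈ l1, p c = true) :
    (l1 ++ l2).takeWhile p = l1 ++ l2.takeWhile p := by
  induction l1 with
  | nil => simp
  | cons x t ih =>
    have hx : p x = true := h x (by simp)
    simp only [List.cons_append, List.takeWhile_cons, hx, if_pos]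
    rw [ih (fun c hc => h c (by simp [hc]))]

theorem pv_dw_append (p : Char → Bool) (l1 l2 : List Char) (h : ∀ c ∈ l1, p c = true) :
    (l1 ++ l2).dropWhile p = l2.dropWhile p := by
  induction l1 with
  | nil => simp
  | cons x t ih =>
    have hx : p x = true := h x (by simp)
    simp only [List.cons_append, List.dropWhile_cons, hx, if_pos]
    exact ih (fun c hc => h c (by simp [hc]))

theorem pvRunSum_nd_all (l : List Char) (hne : l ≠ []) (h : ∀ c ∈ l, pvPd c = false) :
    pvRunSum l = (PySem.Int.ofChars? l).getD 0 := by
  cases l with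
  | nil => exact absurd rfl hne
  | cons b t =>
    rw [pvRunSum_nd _ _ (h b (by simp))]
    have htw : t.takeWhile (fun x => !pvPd x) = t := by
      rw [List.takeWhile_eq_self_iff]
      intro a ha
      simp [h a (by simp [ha])]
    have hdw : t.dropWhile (fun x => !pvPd x) = [] := by
      rw [List.dropWhile_eq_nil_iff]
      intro a ha
      simp [h a (by simp [ha])]
    rw [htw, hdw, pvRunSum]
    ring

theorem pvRunSum_buf_color (buf : List Char) (hne : buf ≠ [])
    (hbuf : ∀ c ∈ buf, pvPd c = false) (c : Char) (hc : pvPd c = true) (cs : List Char) :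
    pvRunSum (buf ++ c :: cs) = (PySem.Int.ofChars? buf).getD 0 + pvRunSum cs := by
  cases buf with
  | nil => exact absurd rfl hne
  | cons b t =>
    rw [List.cons_append, pvRunSum_nd _ _ (hbuf b (by simp))]
    have hnd : ∀ x ∈ t, (fun x => !pvPd x) x = true := by
      intro x hx; simp [hbuf x (by simp [hx])]
    rw [pv_tw_append _ t (c :: cs) hnd, pv_dw_append _ t (c :: cs) hnd]
    rw [List.takeWhile_cons, List.dropWhile_cons]
    simp only [hc, Bool.not_true, Bool.false_eq_true, if_false, List.append_nil]
    rw [pvRunSum_pd _ _ hc]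

-- B's parse: the symbols component is exactly the pvPd-true chars, in order
theorem pvParse_syms (l : List Char) (sy : List Char) (rs : List (List Char)) (buf : List Char) :
    (l.foldl pvParseStep (sy, rs, buf)).1 = sy ++ l.filter pvPd := by
  induction l generalizing sy rs buf with
  | nil => simp
  | cons c t ih =>
    rw [List.foldl_cons, List.filter_cons]
    by_cases hc : pvPd c
    · by_cases hb : buf ≠ []
      · rw [show pvParseStep (sy, rs, buf) c = (sy ++ [c], rs ++ [buf], []) by
          simp [pvParseStep, hc, hb]]
        rw [ih, hc, if_pos rfl, List.append_assoc, List.singleton_append]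
      · rw [show pvParseStep (sy, rs, buf) c = (sy ++ [c], rs, []) by
          simp [pvParseStep, hc, not_not.mp hb]]
        rw [ih, hc, if_pos rfl, List.append_assoc, List.singleton_append]
    · rw [show pvParseStep (sy, rs, buf) c = (sy, rs, buf ++ [c]) by
        simp [pvParseStep, hc]]
      rw [ih]
      simp [hc]

-- B's parse: the int-sum over the runs (with the trailing buffer flushed) is pvRunSum
theorem pvParse_generic (l : List Char) (sy : List Char) (rs : List (List Char)) (buf : List Char)
    (hbuf : ∀ c ∈ buf, pvPd c = false)
    (hok : ∀ c ∈ l, c ∈ pvColors ∨ c.isDigit = true) :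
    ((if (l.foldl pvParseStep (sy, rs, buf)).2.2 ≠ [] then
        (l.foldl pvParseStep (sy, rs, buf)).2.1 ++ [(l.foldl pvParseStep (sy, rs, buf)).2.2]
      else (l.foldl pvParseStep (sy, rs, buf)).2.1).map
        (fun r => (PySem.Int.ofChars? r).getD 0)).sum =
      (rs.map (fun r => (PySem.Int.ofChars? r).getD 0)).sum + pvRunSum (buf ++ l) := by
  induction l generalizing sy rs buf with
  | nil =>
    simp only [List.foldl_nil, List.append_nil]
    by_cases hb : buf = []
    · subst hb
      simp [pvRunSum]
    · rw [if_pos (by simpa using hb), List.map_append, List.sum_append,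
        pvRunSum_nd_all buf hb hbuf]
      simp
  | cons c t ih =>
    have hok' : ∀ x ∈ t, x ∈ pvColors ∨ x.isDigit = true := fun x hx => hok x (by simp [hx])
    rw [List.foldl_cons]
    by_cases hc : pvPd c
    · by_cases hb : buf = []
      · rw [show pvParseStep (sy, rs, buf) c = (sy ++ [c], rs, []) by
          simp [pvParseStep, hc, hb]]
        rw [ih _ _ _ (by simp) hok']
        subst hb
        rw [List.nil_append, List.nil_append, pvRunSum_pd _ _ hc]
      · rw [show pvParseStep (sy, rs, buf) c = (sy ++ [c], rs ++ [buf], []) by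
          simp [pvParseStep, hc, hb]]
        rw [ih _ _ _ (by simp) hok']
        rw [List.nil_append, List.map_append, List.sum_append,
          pvRunSum_buf_color buf hb hbuf c hc t]
        simp
        ring
    · have hcpd : pvPd c = false := by simpa using hc
      rw [show pvParseStep (sy, rs, buf) c = (sy, rs, buf ++ [c]) by
        simp [pvParseStep, hc]]
      rw [ih _ _ (buf ++ [c]) ?hb hok']
      · rw [List.append_assoc, List.singleton_append]
      · intro x hx
        rcases List.mem_append.mp hx with hx | hx
        · exact hbuf x hx
        · simp at hx; rw [hx]; exact hcpd

-- pay succeeded: multiset bookkeeping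
theorem pvPay_some_count (syms : List Char) (pool r : List Char)
    (h : pvPay pool syms = some r) (c : Char) :
    pool.count c = r.count c + syms.count c := by
  induction syms generalizing pool with
  | nil =>
    rw [pvPay] at h
    simp at h
    subst h
    simp
  | cons s rest ih =>
    rw [pvPay] at h
    by_cases hm : s ∈ pool
    · rw [PySem.List.remove?_eq_some_erase pool s hm] at h
      have := ih (pool.erase s) h
      by_cases hcs : c = s
      · subst hcs
        have h1 : (pool.erase c).count c = pool.count c - 1 := List.count_erase_self
        have hpos : 0 < pool.count c := List.count_pos_iff.mpr hm
        simp only [List.count_cons, BEq.rfl, if_pos]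
        omega
      · have h1 : (pool.erase s).count c = pool.count c := List.count_erase_of_ne hcs
        simp only [List.count_cons, beq_iff_eq]
        split_ifs with hb
        · cases hcs (by first | exact hb | exact hb.symm)
        · omega
    · rw [(PySem.List.remove?_eq_none_iff pool s).mpr hm] at h
      exact absurd h (by simp)

theorem pvPay_some_len (syms : List Char) (pool r : List Char)
    (h : pvPay pool syms = some r) :
    pool.length = r.length + syms.length := by
  induction syms generalizing pool with
  | nil =>
    rw [pvPay] at h
    simp at h
    subst h
    simp
  | cons s rest ih =>
    rw [pvPay] at h
    by_cases hm : s ∈ pool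
    · rw [PySem.List.remove?_eq_some_erase pool s hm] at h
      have := ih (pool.erase s) h
      have hl : (pool.erase s).length = pool.length - 1 := List.length_erase_of_mem hm
      have hpos : 0 < pool.length := List.length_pos_of_mem hm
      simp only [List.length_cons]
      omega
    · rw [(PySem.List.remove?_eq_none_iff pool s).mpr hm] at h
      exact absurd h (by simp)

theorem pvPay_isSome_of (syms : List Char) (pool : List Char)
    (h : ∀ c, syms.count c ≤ pool.count c) :
    (pvPay pool syms).isSome = true := by
  induction syms generalizing pool with
  | nil => rw [pvPay]; rfl
  | cons s rest ih =>
    have hmem : s ∈ pool := by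
      have := h s
      simp only [List.count_cons, BEq.rfl, if_pos] at this
      exact List.count_pos_iff.mp (by omega)
    rw [pvPay, PySem.List.remove?_eq_some_erase pool s hmem]
    apply ih
    intro c
    by_cases hcs : c = s
    · subst hcs
      have h1 : (pool.erase c).count c = pool.count c - 1 := List.count_erase_self
      have := h c
      simp only [List.count_cons, BEq.rfl, if_pos] at this
      omega
    · have h1 : (pool.erase s).count c = pool.count c := List.count_erase_of_ne hcs
      have := h c
      simp only [List.count_cons, beq_iff_eq] at this
      split_ifs at this with hb
      · cases hcs (by first | exact hb | exact hb.symm)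
      · omega

theorem pv_all_congr (l : List Char) (f g : Char → Bool) (h : ∀ x ∈ l, f x = g x) :
    l.all f = l.all g := by
  induction l with
  | nil => rfl
  | cons x t ih =>
    simp only [List.all_cons, h x (by simp), ih (fun y hy => h y (by simp [hy]))]

theorem pvFinLoop_spec (ks : List Char) (d e : PySem.Dict Char Int) (total : Int)
    (hnd : ks.Nodup) :
    pvFinLoop d e total ks =
      if ks.all (fun x => decide (e.getD x 0 ≤ d.getD x 0)) then
        some (total + (ks.map (fun x => d.getD x 0 - e.getD x 0)).sum)
      else none := by
  induction ks generalizing d total with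
  | nil => simp [pvFinLoop]
  | cons x rest ih =>
    have hx : x ∉ rest := (List.nodup_cons.mp hnd).1
    have hnd' : rest.Nodup := (List.nodup_cons.mp hnd).2
    rw [pvFinLoop]
    by_cases hlt : d.getD x 0 < e.getD x 0
    · rw [if_pos hlt]
      have hc : decide (e.getD x 0 ≤ d.getD x 0) = false := by simp; omega
      rw [List.all_cons, hc]
      simp
    · rw [if_neg hlt]
      have hself : (d.insert x (d.getD x 0 - e.getD x 0)).getD x 0 = d.getD x 0 - e.getD x 0 :=
        PySem.Dict.getD_insert_self d x _ 0
      rw [ih (d.insert x (d.getD x 0 - e.getD x 0)) _ hnd', hself]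
      have hrest : ∀ y ∈ rest, (d.insert x (d.getD x 0 - e.getD x 0)).getD y 0 = d.getD y 0 := by
        intro y hy
        exact PySem.Dict.getD_insert_of_ne d _ 0 (fun hyx => hx (hyx ▸ hy))
      rw [pv_all_congr rest _ _ (fun y hy => by rw [hrest y hy])]
      rw [List.map_congr_left (fun y hy => by
        show (d.insert x (d.getD x 0 - e.getD x 0)).getD y 0 - e.getD y 0 = d.getD y 0 - e.getD y 0
        rw [hrest y hy] :
        ∀ y ∈ rest, (fun x_1 => (d.insert x (d.getD x 0 - e.getD x 0)).getD x_1 0 - e.getD x_1 0) y =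
          (fun x_1 => d.getD x_1 0 - e.getD x_1 0) y)]
      rw [List.all_cons]
      have hc : decide (e.getD x 0 ≤ d.getD x 0) = true := by simp; omega
      rw [hc, Bool.true_and]
      by_cases hall : rest.all (fun y => decide (e.getD y 0 ≤ d.getD y 0))
      · rw [if_pos hall, if_pos hall]
        rw [List.map_cons, List.sum_cons]
        congr 1
        ring
      · rw [if_neg (by simpa using hall), if_neg (by simpa using hall)]

theorem pv_count_sum (l : List Char) (h : ∀ c ∈ l, c ∈ pvColors) :
    (l.count 'B' : Int) + l.count 'W' + l.count 'R' + l.count 'G' + l.count 'U' + l.count 'C' =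
      l.length := by
  induction l with
  | nil => simp
  | cons x t ih =>
    have hx : x ∈ pvColors := h x (by simp)
    have ht := ih (fun c hc => h c (by simp [hc]))
    simp only [pvColors, List.mem_cons, List.mem_singleton, List.not_mem_nil, or_false] at hx
    rcases hx with rfl | rfl | rfl | rfl | rfl | rfl <;>
      simp [List.count_cons] <;> push_cast <;> omega

theorem pvInitDict_getD (x : Char) (h : x ∈ pvColors) : pvInitDict.getD x 0 = 0 := by
  fin_cases h <;> decide

-- ===== VERDICT (by name: the statement is the Claim_ definition above) =====
theorem can_pay_cost_spec : Claim_equal_can_pay_cost := by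
  intro mp cost _ hpre
  have hmp : ∀ c ∈ mp.toList, c ∈ pvColors := by
    have := hpre.1
    simp only [List.all_eq_true, List.contains_eq_mem, decide_eq_true_eq] at this
    exact this
  have hcost : ∀ c ∈ cost.toList, c ∈ pvColors ∨ c.isDigit = true := by
    have := hpre.2
    simp only [List.all_eq_true, List.contains_eq_mem, Bool.or_eq_true, decide_eq_true_eq] at this
    exact this
  unfold Spec_can_pay_cost can_pay_cost can_pay_cost_alt
  dsimp only
  -- reduce A's side
  have hlen : PySem.Str.len mp = (mp.toList.length : Int) := by simp [PySem.Str.len]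
  rw [hlen, PySem.List.foldl_pyRange_zero_pyGetD' mp.toList ' '
    (fun d c => d.modify c 0 (· + 1)) pvInitDict]
  rw [pvOuter_spec cost.toList 0 pvInitDict 0, List.drop_zero]
  rw [pvFinLoop_spec pvColors _ _ 0 (by decide)]
  -- reduce B's side
  rw [pvParse_generic cost.toList [] [] [] (by simp) hcost]
  rw [pvParse_syms cost.toList [] [] []]
  simp only [List.map_nil, List.sum_nil, List.nil_append, Int.zero_add]
  -- shared facts
  have hsymcol : ∀ c ∈ cost.toList.filter pvPd, c ∈ pvColors := by
    intro c hc
    have hm := List.mem_of_mem_filter hc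
    have hp := List.of_mem_filter hc
    rcases hcost c hm with h | h
    · exact h
    · rw [pv_digit_pd c h] at hp; exact absurd hp (by simp)
  have hd : ∀ x ∈ pvColors,
      (mp.toList.foldl (fun d c => d.modify c 0 (· + 1)) pvInitDict).getD x 0 =
        (mp.toList.count x : Int) := by
    intro x hx
    rw [PySem.Dict.getD_foldl_modify_add_one, pvInitDict_getD x hx, Int.zero_add]
  have he : ∀ x ∈ pvColors, (pvAddCounts pvInitDict cost.toList).getD x 0 =
      ((cost.toList.filter pvPd).count x : Int) := by
    intro x hx
    rw [pvAddCounts, PySem.Dict.getD_foldl_modify_add_one, pvInitDict_getD x hx, Int.zero_add]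
  have hcond : (pvColors.all fun x => decide ((pvAddCounts pvInitDict cost.toList).getD x 0 ≤
        (mp.toList.foldl (fun d c => d.modify c 0 (· + 1)) pvInitDict).getD x 0)) =
      (pvColors.all fun x => decide (((cost.toList.filter pvPd).count x : Int) ≤
        (mp.toList.count x : Int))) := by
    apply pv_all_congr
    intro x hx
    rw [hd x hx, he x hx]
  rw [hcond]
  have hiff : (pvColors.all fun x => decide (((cost.toList.filter pvPd).count x : Int) ≤
      (mp.toList.count x : Int))) = true ↔
      ∀ c, (cost.toList.filter pvPd).count c ≤ mp.toList.count c := by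
    rw [List.all_eq_true]
    constructor
    · intro h c
      by_cases hc : c ∈ pvColors
      · have := h c hc
        rw [decide_eq_true_eq] at this
        exact_mod_cast this
      · have hnm : c ∉ cost.toList.filter pvPd := fun hm => hc (hsymcol c hm)
        rw [List.count_eq_zero.mpr hnm]
        exact Nat.zero_le _
    · intro h x _
      rw [decide_eq_true_eq]
      exact_mod_cast h x
  by_cases hall : (pvColors.all fun x => decide (((cost.toList.filter pvPd).count x : Int) ≤
      (mp.toList.count x : Int)))
  · rw [if_pos hall]
    have hC := hiff.mp hall
    obtain ⟨r, hr⟩ := Option.isSome_iff_exists.mp (pvPay_isSome_of _ mp.toList hC)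
    rw [hr]
    simp only
    have hplen := pvPay_some_len _ mp.toList r hr
    have hmpl := pv_count_sum mp.toList hmp
    have hsyl := pv_count_sum (cost.toList.filter pvPd) hsymcol
    rw [List.map_congr_left (fun x hx => by
      show (mp.toList.foldl (fun d c => d.modify c 0 (· + 1)) pvInitDict).getD x 0 -
          (pvAddCounts pvInitDict cost.toList).getD x 0 =
        (mp.toList.count x : Int) - ((cost.toList.filter pvPd).count x : Int)
      rw [hd x hx, he x hx] :
      ∀ x ∈ pvColors, (fun x => (mp.toList.foldl (fun d c => d.modify c 0 (· + 1))
          pvInitDict).getD x 0 - (pvAddCounts pvInitDict cost.toList).getD x 0) x =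
        (fun x => (mp.toList.count x : Int) - ((cost.toList.filter pvPd).count x : Int)) x)]
    simp only [pvColors, List.map_cons, List.map_nil, List.sum_cons, List.sum_nil]
    rw [decide_eq_decide]
    omega
  · rw [if_neg (by simpa using hall)]
    cases hp : pvPay mp.toList (cost.toList.filter pvPd) with
    | none => rfl
    | some r =>
      exfalso
      exact hall (hiff.mpr (fun c => by
        have := pvPay_some_count _ mp.toList r hp c
        omega))
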